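-- pv_equiv track=rewrite | github.com/AnshikSahu/codeforces | test2.py | text_editor
-- ===== SOURCE A (Python) =====
-- def text_editor(S):
--     n=len(S)
--     for i in range(n//2,1,-1):
--         p=S[:i]
--         if p==S[i:2*i]:
--             for j in range(2,n//i):
--                 if p==S[j*i:(j+1)*i]:
--                     return p,j+1
--             return p,2
--     return S,1
-- ===== SOURCE B (Python) =====
-- def _zfunc(S):
--     # Z-algorithm: z[k] = length of the longest common prefix of S and S[k:] (k >= 1)
--     n = len(S)
--     z = [0] * n
--     l = r = 0
--     for k in range(1, n):
--         m = 0
--         if k < r: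
--             m = min(r - k, z[k - l])
--         while k + m < n and S[m] == S[k + m]:
--             m += 1
--         z[k] = m
--         if r < k + m:
--             l, r = k, k + m
--     return z
--
-- def text_editor(S):
--     n = len(S)
--     z = _zfunc(S)
--     for i in range(n // 2, 1, -1):
--         if z[i] >= i:
--             for j in range(2, n // i):
--                 if z[j * i] >= i:
--                     return S[:i], j + 1
--             return S[:i], 2
--     return S, 1
-- ===== Notes on version B (the rewrite author's own statement) =====
-- stated objective: alternative
-- what changed: B precomputes the Z-function (longest common prefix of S with every suffix, computed by the l/r-window Z-algorithm) once, so each of A's length-i slice comparisons (S[:i]==S[i:2i], S[:i]==S[j*i:(j+1)*i]) becomes a single O(1) table lookup z[k]>=i; which program is faster depends on the input family (A exits almost immediately on periodic strings, B wins on non-periodic ones), so no speed is claimed.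
import Mathlib
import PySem

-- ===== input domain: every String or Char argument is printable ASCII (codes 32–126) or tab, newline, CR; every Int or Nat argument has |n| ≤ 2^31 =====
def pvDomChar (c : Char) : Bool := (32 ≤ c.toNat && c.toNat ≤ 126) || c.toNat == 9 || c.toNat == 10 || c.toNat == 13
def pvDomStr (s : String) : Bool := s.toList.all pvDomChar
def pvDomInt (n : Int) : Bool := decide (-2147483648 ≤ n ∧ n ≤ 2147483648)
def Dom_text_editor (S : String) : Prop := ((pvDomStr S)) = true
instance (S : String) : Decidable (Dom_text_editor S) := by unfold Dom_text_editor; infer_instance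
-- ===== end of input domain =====

-- B precomputes the Z-function (longest common prefix of S with each suffix) once,
-- so each of A's length-i block slice comparisons becomes a single table lookup.

-- ===== PORT A =====
-- A's slices S[:i], S[i:2*i], S[j*i:(j+1)*i] have nonnegative in-order bounds, so they
-- are exactly List.take / (List.drop …).take … (PySem.List.slice_natCast).
-- inner loop: 'for j in range(2, n//i)' with early return
def pvAInner (L p : List Char) (i : Nat) : List Nat → String × Int
  | [] => (String.ofList p, 2)
  | j :: js =>
      if p = (L.drop (j * i)).take i then (String.ofList p, (j : Int) + 1)
      else pvAInner L p i js

-- outer loop: 'for i in range(n//2, 1, -1)' with early return, fuel = current i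
def pvAOuter (L : List Char) (n : Nat) : Nat → String × Int
  | 0 => (String.ofList L, 1)
  | 1 => (String.ofList L, 1)
  | (i + 2) =>
      let p := L.take (i + 2)
      if p = (L.drop (i + 2)).take (i + 2) then
        pvAInner L p (i + 2) (List.range' 2 (n / (i + 2) - 2))
      else pvAOuter L n (i + 1)

def text_editor (S : String) : String × Int :=
  let L := S.toList
  pvAOuter L L.length (L.length / 2)

-- ===== PORT B =====
-- the 'while k + m < n and S[m] == S[k+m]: m += 1' loop of _zfunc;
-- both indices are in range whenever the guard holds, so getD is exact
def pvExt (L : List Char) (k m : Nat) : Nat :=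
  if h : k + m < L.length ∧ L.getD m ' ' = L.getD (k + m) ' ' then pvExt L k (m + 1)
  else m
termination_by L.length - (k + m)
decreasing_by omega

-- one iteration of _zfunc's 'for k in range(1, n)' loop, state (z, l, r)
def pvZStep (L : List Char) (st : List Nat × Nat × Nat) (k : Nat) : List Nat × Nat × Nat :=
  let z := st.1
  let l := st.2.1
  let r := st.2.2
  let m0 := if k < r then min (r - k) (z.getD (k - l) 0) else 0
  let m := pvExt L k m0
  let z' := z.set k m
  if r < k + m then (z', k, k + m) else (z', l, r)

def pvZfunc (L : List Char) : List Nat :=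
  ((List.range' 1 (L.length - 1)).foldl (pvZStep L) (List.replicate L.length 0, 0, 0)).1

-- inner loop of Source B; z[j*i] is always in range (proved in the lemmas), so getD is exact
def pvBInner (L : List Char) (z : List Nat) (i : Nat) : List Nat → String × Int
  | [] => (String.ofList (L.take i), 2)
  | j :: js =>
      if i ≤ z.getD (j * i) 0 then (String.ofList (L.take i), (j : Int) + 1)
      else pvBInner L z i js

def pvBOuter (L : List Char) (z : List Nat) (n : Nat) : Nat → String × Int
  | 0 => (String.ofList L, 1)
  | 1 => (String.ofList L, 1)
  | (i + 2) =>
      if (i + 2) ≤ z.getD (i + 2) 0 then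
        pvBInner L z (i + 2) (List.range' 2 (n / (i + 2) - 2))
      else pvBOuter L z n (i + 1)

def text_editor_alt (S : String) : String × Int :=
  let L := S.toList
  pvBOuter L (pvZfunc L) L.length (L.length / 2)

-- ===== PRECONDITION & SPEC =====
def Spec_text_editor (S : String) (out : String × Int) : Prop := out = text_editor_alt S
instance (S : String) (out : String × Int) : Decidable (Spec_text_editor S out) := by unfold Spec_text_editor; infer_instance

-- ===== CLAIM (what is proved, stated in full; the proofs are below) =====
def Claim_equal_text_editor : Prop := ∀ (S : String), Dom_text_editor S → Spec_text_editor S (text_editor S)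

-- ===== LEMMAS AND PROOFS =====

-- specification function for the proofs: length of the longest common prefix
def pvLcp : List Char → List Char → Nat
  | a :: as, b :: bs => if a = b then pvLcp as bs + 1 else 0
  | _, _ => 0

theorem pvLcp_ge_iff : ∀ (i : Nat) (xs ys : List Char), i ≤ ys.length →
    (i ≤ pvLcp xs ys ↔ xs.take i = ys.take i) := by
  intro i
  induction i with
  | zero => intro xs ys _; simp
  | succ i ih =>
    intro xs ys hlen
    cases ys with
    | nil => simp at hlen
    | cons b bs =>
      cases xs with
      | nil =>
        simp [pvLcp]
      | cons a as =>
        by_cases hab : a = b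
        · subst hab
          simp only [pvLcp, List.take_succ_cons, List.cons.injEq, true_and]
          rw [if_pos trivial, Nat.add_le_add_iff_right]
          exact ih as bs (by simpa using hlen)
        · simp [pvLcp, hab]

theorem pvLcp_le : ∀ (xs ys : List Char), pvLcp xs ys ≤ ys.length := by
  intro xs
  induction xs with
  | nil => intro ys; cases ys <;> simp [pvLcp]
  | cons a as ih =>
    intro ys
    cases ys with
    | nil => simp [pvLcp]
    | cons b bs =>
      by_cases h : a = b
      · simpa [pvLcp, h] using ih bs
      · simp [pvLcp, h]

-- prefix-vs-window equality, elementwise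
theorem take_drop_eq_iff (L : List Char) (k m : Nat) (h : k + m ≤ L.length) :
    (L.take m = (L.drop k).take m) ↔ ∀ t, t < m → L.getD t ' ' = L.getD (k + t) ' ' := by
  constructor
  · intro he t ht
    have h1 : t < L.length := by omega
    have h2 : k + t < L.length := by omega
    have := congrArg (fun xs => xs[t]?) he
    simp only [List.getElem?_take, List.getElem?_drop, if_pos ht] at this
    rw [List.getD_eq_getElem?_getD, List.getD_eq_getElem?_getD, this]
  · intro he
    apply List.ext_getElem
    · simp; omega
    · intro i h1 h2
      have hi : i < m := by simp at h1; omega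
      have hL : i < L.length := by omega
      have hkL : k + i < L.length := by omega
      have := he i hi
      simpa [List.getElem_take, List.getElem_drop, List.getD_eq_getElem, hL, hkL] using this

-- the while loop computes the exact lcp once its start already matches
theorem pvExt_eq (L : List Char) (k : Nat) :
    ∀ (d m : Nat), k + m ≤ L.length → L.length - (k + m) ≤ d →
    (∀ t, t < m → L.getD t ' ' = L.getD (k + t) ' ') →
    pvExt L k m = pvLcp L (L.drop k) := by
  intro d
  induction d with
  | zero =>
    intro m hm hd hpre
    have hn : k + m = L.length := by omega
    rw [pvExt, dif_neg (by omega)]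
    have hge : m ≤ pvLcp L (L.drop k) := by
      rw [pvLcp_ge_iff m L (L.drop k) (by simp; omega)]
      exact (take_drop_eq_iff L k m hm).mpr hpre
    have hle : pvLcp L (L.drop k) ≤ m := by
      have := pvLcp_le L (L.drop k)
      simp at this; omega
    omega
  | succ d ih =>
    intro m hm hd hpre
    rw [pvExt]
    by_cases hc : k + m < L.length ∧ L.getD m ' ' = L.getD (k + m) ' '
    · rw [dif_pos hc]
      apply ih (m + 1) (by omega) (by omega)
      intro t ht
      by_cases htm : t < m
      · exact hpre t htm
      · have : t = m := by omega
        subst this; exact hc.2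
    · rw [dif_neg hc]
      have hge : m ≤ pvLcp L (L.drop k) := by
        rw [pvLcp_ge_iff m L (L.drop k) (by simp; omega)]
        exact (take_drop_eq_iff L k m hm).mpr hpre
      by_cases hend : k + m < L.length
      · -- characters differ at position m
        have hne : L.getD m ' ' ≠ L.getD (k + m) ' ' := fun he => hc ⟨hend, he⟩
        have hlt : pvLcp L (L.drop k) < m + 1 := by
          by_contra hcon
          push Not at hcon
          have := (pvLcp_ge_iff (m + 1) L (L.drop k) (by simp; omega)).mp hcon
          exact hne (((take_drop_eq_iff L k (m + 1) (by omega)).mp this) m (by omega))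
        omega
      · have hle : pvLcp L (L.drop k) ≤ m := by
          have := pvLcp_le L (L.drop k)
          simp at this; omega
        omega

-- loop invariant of _zfunc before processing index k
def pvInv (L : List Char) (k : Nat) (z : List Nat) (l r : Nat) : Prop :=
  z.length = L.length ∧ l ≤ r ∧ r ≤ L.length ∧ l < k ∧ (0 < r → 0 < l) ∧
  (∀ s, s < r - l → L.getD s ' ' = L.getD (l + s) ' ') ∧
  (∀ j, 1 ≤ j → j < k → z.getD j 0 = pvLcp L (L.drop j))

theorem pvZStep_inv (L : List Char) (k : Nat) (z : List Nat) (l r : Nat)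
    (hk1 : 1 ≤ k) (hkn : k < L.length) (h : pvInv L k z l r) :
    pvInv L (k + 1) ((pvZStep L (z, l, r) k).1)
      ((pvZStep L (z, l, r) k).2.1) ((pvZStep L (z, l, r) k).2.2) := by
  obtain ⟨hzl, hlr, hrn, hlk, hr0, hw, hzs⟩ := h
  simp only [pvZStep]
  set m0 := if k < r then min (r - k) (z.getD (k - l) 0) else 0 with hm0
  have hm0n : k + m0 ≤ L.length := by
    rw [hm0]; split <;> omega
  have hm0pre : ∀ t, t < m0 → L.getD t ' ' = L.getD (k + t) ' ' := by
    intro t ht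
    rw [hm0] at ht
    by_cases hkr : k < r
    · rw [if_pos hkr] at ht
      have hl1 : 0 < l := hr0 (by omega)
      have hzkl : z.getD (k - l) 0 = pvLcp L (L.drop (k - l)) :=
        hzs (k - l) (by omega) (by omega)
      rw [hzkl] at ht
      have htr : t < r - k := by omega
      have htl : t < pvLcp L (L.drop (k - l)) := by omega
      -- L[t] = L[(k-l)+t] from the stored z value
      have h1 : L.getD t ' ' = L.getD ((k - l) + t) ' ' := by
        have hge : t + 1 ≤ pvLcp L (L.drop (k - l)) := by omega
        have := (pvLcp_ge_iff (t + 1) L (L.drop (k - l)) (by simp; omega)).mp hge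
        exact ((take_drop_eq_iff L (k - l) (t + 1) (by omega)).mp this) t (by omega)
      -- L[(k-l)+t] = L[k+t] from the window
      have h2 : L.getD ((k - l) + t) ' ' = L.getD (l + ((k - l) + t)) ' ' :=
        hw ((k - l) + t) (by omega)
      rw [h1, h2]
      congr 1
      omega
    · rw [if_neg hkr] at ht; omega
  have hm : pvExt L k m0 = pvLcp L (L.drop k) :=
    pvExt_eq L k (L.length - (k + m0)) m0 hm0n (le_refl _) hm0pre
  set m := pvExt L k m0 with hmdef
  have hmn : m ≤ L.length - k := by
    rw [hm]
    have := pvLcp_le L (L.drop k)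
    simpa using this
  have hzs' : ∀ j, 1 ≤ j → j < k + 1 → (z.set k m).getD j 0 = pvLcp L (L.drop j) := by
    intro j hj1 hj2
    by_cases hjk : j = k
    · subst hjk
      rw [List.getD_eq_getElem?_getD, List.getElem?_set_self (by omega)]
      simpa using hm
    · rw [List.getD_eq_getElem?_getD, List.getElem?_set_ne (fun he => hjk he.symm),
        ← List.getD_eq_getElem?_getD]
      exact hzs j hj1 (by omega)
  by_cases hbr : r < k + m
  · rw [if_pos hbr]
    show pvInv L (k + 1) (z.set k m) k (k + m)
    refine ⟨by simpa using hzl, by omega, by omega, by omega, fun _ => by omega, ?_, hzs'⟩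
    intro s hs
    have hsm : s < m := by omega
    have hge : s + 1 ≤ pvLcp L (L.drop k) := by rw [← hm]; omega
    have := (pvLcp_ge_iff (s + 1) L (L.drop k) (by simp; omega)).mp hge
    exact ((take_drop_eq_iff L k (s + 1) (by omega)).mp this) s (by omega)
  · rw [if_neg hbr]
    show pvInv L (k + 1) (z.set k m) l r
    exact ⟨by simpa using hzl, hlr, hrn, by omega, hr0, hw, hzs'⟩

theorem pvZloop (L : List Char) :
    ∀ (c s : Nat) (z : List Nat) (l r : Nat), 1 ≤ s → s + c ≤ L.length →
    pvInv L s z l r →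
    pvInv L (s + c) (((List.range' s c).foldl (pvZStep L) (z, l, r)).1)
      (((List.range' s c).foldl (pvZStep L) (z, l, r)).2.1)
      (((List.range' s c).foldl (pvZStep L) (z, l, r)).2.2) := by
  intro c
  induction c with
  | zero => intro s z l r _ _ hinv; simpa using hinv
  | succ c ih =>
    intro s z l r hs hle hinv
    rw [List.range'_succ]
    simp only [List.foldl_cons]
    have hstep := pvZStep_inv L s z l r hs (by omega) hinv
    have := ih (s + 1) ((pvZStep L (z, l, r) s).1) ((pvZStep L (z, l, r) s).2.1)
      ((pvZStep L (z, l, r) s).2.2) (by omega) (by omega) hstep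
    rw [show s + (c + 1) = (s + 1) + c by omega]
    simpa using this

theorem pvZfunc_getD (L : List Char) (k : Nat) (h1 : 1 ≤ k) (h2 : k < L.length) :
    (pvZfunc L).getD k 0 = pvLcp L (L.drop k) := by
  unfold pvZfunc
  have h0 : pvInv L 1 (List.replicate L.length 0) 0 0 := by
    refine ⟨by simp, le_refl _, by omega, by omega, by omega, ?_, ?_⟩
    · intro s hs; omega
    · intro j hj1 hj2; omega
  have := pvZloop L (L.length - 1) 1 (List.replicate L.length 0) 0 0 (le_refl _)
    (by omega) h0
  rw [show 1 + (L.length - 1) = L.length by omega] at this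
  exact this.2.2.2.2.2.2 k h1 h2

theorem inner_eq (L : List Char) (z : List Nat)
    (hz : ∀ k, 1 ≤ k → k < L.length → z.getD k 0 = pvLcp L (L.drop k))
    (i : Nat) (hi : 1 ≤ i) :
    ∀ js : List Nat, (∀ j ∈ js, 2 ≤ j ∧ j * i + i ≤ L.length) →
    pvAInner L (L.take i) i js = pvBInner L z i js := by
  intro js
  induction js with
  | nil => intro _; rfl
  | cons j js ih =>
    intro hall
    obtain ⟨hj2, hj⟩ := hall j (List.mem_cons_self ..)
    have hk1 : 1 ≤ j * i := by nlinarith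
    have hk : j * i < L.length := by omega
    simp only [pvAInner, pvBInner]
    rw [hz (j * i) hk1 hk]
    have hiff := pvLcp_ge_iff i L (L.drop (j * i)) (by simp; omega)
    by_cases h : i ≤ pvLcp L (L.drop (j * i))
    · rw [if_pos (hiff.mp h), if_pos h]
    · rw [if_neg (fun hc => h (hiff.mpr hc)), if_neg h]
      exact ih (fun j hj => hall j (List.mem_cons_of_mem _ hj))

theorem outer_eq (L : List Char) (z : List Nat)
    (hz : ∀ k, 1 ≤ k → k < L.length → z.getD k 0 = pvLcp L (L.drop k)) :
    ∀ fuel : Nat, fuel ≤ L.length / 2 →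
    pvAOuter L L.length fuel = pvBOuter L z L.length fuel := by
  intro fuel
  induction fuel with
  | zero => intro _; rfl
  | succ f ih =>
    intro hf
    match f, ih, hf with
    | 0, _, _ => rfl
    | (i + 1), ih, hf =>
      have hlen : (i + 2) + (i + 2) ≤ L.length := by omega
      have hk : i + 2 < L.length := by omega
      simp only [pvAOuter, pvBOuter]
      rw [hz (i + 2) (by omega) hk]
      have hiff := pvLcp_ge_iff (i + 2) L (L.drop (i + 2)) (by simp; omega)
      by_cases h : (i + 2) ≤ pvLcp L (L.drop (i + 2))
      case pos =>
        rw [if_pos (hiff.mp h), if_pos h]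
        apply inner_eq L z hz (i + 2) (by omega)
        intro j hj
        have hmem := (List.mem_range'_1).mp hj
        have hjlt : j < L.length / (i + 2) := by omega
        have hmul : (j + 1) * (i + 2) ≤ (L.length / (i + 2)) * (i + 2) :=
          Nat.mul_le_mul_right _ (by omega)
        have hdiv : (L.length / (i + 2)) * (i + 2) ≤ L.length := Nat.div_mul_le_self _ _
        exact ⟨hmem.1, by nlinarith⟩
      case neg =>
        rw [if_neg (fun hc => h (hiff.mpr hc)), if_neg h]
        exact ih (by omega)

-- ===== VERDICT (by name: the statement is the Claim_ definition above) =====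
theorem text_editor_spec : Claim_equal_text_editor := by
  intro S _
  show text_editor S = text_editor_alt S
  unfold text_editor text_editor_alt
  exact outer_eq S.toList (pvZfunc S.toList) (pvZfunc_getD S.toList)
    (S.toList.length / 2) (le_refl _)
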